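-- pv_equiv track=rewrite | github.com/msjsc001/OmniClip-RAG | omniclip_rag/extensions/tika_catalog.py | _normalize_glob_suffix_id
-- ===== SOURCE A (Python) =====
-- def _normalize_glob_suffix_id(pattern: str) -> str:
--     """Convert Tika glob patterns into a deterministic suffix id.
--
--     Supported examples:
--     - "*.docx"      -> "docx"
--     - "*.tar.gz"    -> "tar.gz"
--     - "*.[Rr][Tt][Ff]" -> "rtf"
--     """
--
--     raw = str(pattern or '').strip()
--     if not raw.startswith('*.'):
--         return ''
--     if '/' in raw or '\\' in raw:
--         return ''
--     if '*' in raw[2:]: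
--         return ''
--     if '?' in raw or '{' in raw or '}' in raw:
--         return ''
--
--     tail = raw[2:]
--     normalized = _normalize_bracket_case_insensitive(tail)
--     if not normalized:
--         return ''
--     if normalized.endswith('.') or normalized.startswith('.'):
--         return ''
--     if '..' in normalized:
--         return ''
--
--     for ch in normalized:
--         if ch.isalnum():
--             continue
--         if ch in ('.', '_', '-', '+'):
--             continue
--         return ''
--     return normalized.lower()
--
-- def _normalize_bracket_case_insensitive(value: str) -> str:
--     result: list[str] = []
--     text = str(value or '')
--     index = 0
--     while index < len(text):
--         ch = text[index]
--         if ch == '[':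
--             end = text.find(']', index + 1)
--             if end < 0:
--                 return ''
--             content = text[index + 1 : end]
--             if len(content) != 2:
--                 return ''
--             a, b = content[0], content[1]
--             if not (a.isalpha() and b.isalpha()):
--                 return ''
--             if a.lower() != b.lower():
--                 return ''
--             result.append(a.lower())
--             index = end + 1
--             continue
--         if ch.isalnum() or ch in ('.', '_', '-', '+'):
--             result.append(ch.lower())
--             index += 1
--             continue
--         return ''
--     return ''.join(result)
-- ===== SOURCE B (Python) =====
-- def _normalize_glob_suffix_id(pattern: str) -> str:
--     """Grammar-style decomposition: split the tail on '.' into segments, and each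
--     segment on '[' into a plain prefix plus bracket chunks; validate the pieces."""
--     raw = (pattern or '').strip()
--     if not raw.startswith('*.'):
--         return ''
--     out_segs = []
--     for seg in raw[2:].split('.'):
--         norm = _norm_segment(seg)
--         if not norm:
--             return ''
--         out_segs.append(norm)
--     return '.'.join(out_segs)
--
--
-- def _norm_plain(s):
--     """Lowercase a run of plain characters; None if any char is not allowed."""
--     for c in s:
--         if not (c.isalnum() or c in '_-+'):
--             return None
--     return s.lower()
--
--
-- def _norm_segment(seg):
--     """One dot-free segment: plain chunk, then ('[' Xx ']' plain-chunk)*."""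
--     if not seg:
--         return ''
--     parts = seg.split('[')
--     plain = _norm_plain(parts[0])
--     if plain is None:
--         return ''
--     pieces = [plain]
--     for part in parts[1:]:
--         if len(part) < 3 or part[2] != ']':
--             return ''
--         a, b = part[0], part[1]
--         if not (a.isalpha() and b.isalpha()) or a.lower() != b.lower():
--             return ''
--         rest = _norm_plain(part[3:])
--         if rest is None:
--             return ''
--         pieces.append(a.lower() + rest)
--     return ''.join(pieces)
-- ===== Notes on version B (the rewrite author's own statement) =====
-- stated objective: alternative
-- what changed: A scans the tail with an index-based while loop that uses str.find to locate each closing bracket, plus separate substring pre-guards and post-checks on the normalized result; B parses the pattern grammar-style: it splits the tail at dots into segments and each segment at opening brackets into a plain prefix plus bracket chunks, validates the pieces, and joins the results, so the dot rules reduce to requiring every segment to be nonempty and no index arithmetic or post-pass is needed.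
import Mathlib
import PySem

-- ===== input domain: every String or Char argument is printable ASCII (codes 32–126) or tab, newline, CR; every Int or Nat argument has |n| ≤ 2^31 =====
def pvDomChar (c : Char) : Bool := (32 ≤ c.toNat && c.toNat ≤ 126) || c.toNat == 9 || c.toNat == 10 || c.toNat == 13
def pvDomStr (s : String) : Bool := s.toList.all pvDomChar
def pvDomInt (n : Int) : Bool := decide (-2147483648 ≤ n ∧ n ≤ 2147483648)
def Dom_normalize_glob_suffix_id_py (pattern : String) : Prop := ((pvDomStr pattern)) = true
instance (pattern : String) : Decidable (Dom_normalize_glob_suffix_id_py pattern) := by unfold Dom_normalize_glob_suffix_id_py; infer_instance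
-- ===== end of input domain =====

-- B replaces A's index-based scan (while loop + str.find for ']') by a grammar-style
-- decomposition: split the tail on '.' into segments and each segment on '[' into a plain
-- prefix plus bracket chunks, validating the pieces (objective: alternative decomposition).

-- ===== PORT A =====
-- port of `ch.isalnum() or ch in ('.', '_', '-', '+')`
def pvAllowedA (c : Char) : Bool :=
  PySem.Chars.isalnum c || (c == '.' || c == '_' || c == '-' || c == '+')

-- port of _normalize_bracket_case_insensitive: the while-loop over `index` becomes a recursion on
-- the remaining text; `text.find(']', index + 1)` is realised exactly as the longest ']'-free
-- prefix `content` of the remainder (find fails ⟺ content is the whole remainder), and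
-- `index = end + 1` as dropping `content` and the ']' after it.
def pvBracketLoop (text : List Char) (result : List Char) : List Char :=
  match text with
  | [] => result                                   -- ''.join(result)
  | ch :: rest =>
    if ch = '[' then
      let content := rest.takeWhile (fun c => c != ']')
      if content.length = rest.length then []      -- end < 0
      else
        match content with
        | [a, b] =>
          if PySem.Chars.isalpha a && PySem.Chars.isalpha b then
            if PySem.Chars.lowerChar a = PySem.Chars.lowerChar b then
              pvBracketLoop (rest.drop (content.length + 1)) (result ++ [PySem.Chars.lowerChar a])
            else []                                -- a.lower() != b.lower()
          else []                                  -- not both alpha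
        | _ => []                                  -- len(content) != 2
    else if pvAllowedA ch then
      pvBracketLoop rest (result ++ [PySem.Chars.lowerChar ch])
    else []
  termination_by text.length
  decreasing_by all_goals simp

def normalize_glob_suffix_id_py (pattern : String) : String :=
  let raw := (PySem.Str.strip pattern).toList      -- str(pattern or '').strip(), as a char list
  if !PySem.Chars.startswith raw ['*', '.'] then "" else
  if PySem.Chars.isIn ['/'] raw || PySem.Chars.isIn ['\\'] raw then "" else
  if PySem.Chars.isIn ['*'] (raw.drop 2) then "" else         -- '*' in raw[2:]
  if PySem.Chars.isIn ['?'] raw || PySem.Chars.isIn ['{'] raw || PySem.Chars.isIn ['}'] raw then "" else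
  let normalized := pvBracketLoop (raw.drop 2) []             -- tail = raw[2:]
  if normalized.isEmpty then "" else
  if PySem.Chars.endswith normalized ['.'] || PySem.Chars.startswith normalized ['.'] then "" else
  if PySem.Chars.isIn ['.', '.'] normalized then "" else
  -- the for-loop (continue/continue/return '') accepts iff every char passes
  if normalized.all pvAllowedA then String.ofList (PySem.Chars.lower normalized) else ""

-- ===== PORT B =====
-- port of `c.isalnum() or c in '_-+'`
def pvAllowedB (c : Char) : Bool :=
  PySem.Chars.isalnum c || (c == '_' || c == '-' || c == '+')

-- port of _norm_plain: the all-chars check, then s.lower()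
def pvNormPlain (s : List Char) : Option (List Char) :=
  if s.all pvAllowedB then some (PySem.Chars.lower s) else none

-- hand port of str.split(sep) for a ONE-character separator (exact there: every occurrence
-- splits, empty pieces are kept, '' gives [''])
def pvSplit (sep : Char) (l : List Char) : List (List Char) :=
  match l with
  | [] => [[]]
  | c :: rest => if c = sep then [] :: pvSplit sep rest else (pvSplit sep rest).modifyHead (c :: ·)

-- port of the `for part in parts[1:]` loop of _norm_segment (pieces are joined as they come)
def pvSegParts (parts : List (List Char)) (pieces : List Char) : List Char :=
  match parts with
  | [] => pieces                                   -- ''.join(pieces)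
  | part :: rest =>
    match part with
    | a :: b :: c :: tl =>
      if c ≠ ']' then [] else                      -- len(part) < 3 or part[2] != ']'
      if !(PySem.Chars.isalpha a && PySem.Chars.isalpha b)
          || PySem.Chars.lowerChar a ≠ PySem.Chars.lowerChar b then [] else
      match pvNormPlain tl with
      | none => []
      | some r => pvSegParts rest (pieces ++ PySem.Chars.lowerChar a :: r)
    | _ => []                                      -- len(part) < 3

-- port of _norm_segment
def pvNormSeg (seg : List Char) : List Char :=
  if seg.isEmpty then [] else                      -- if not seg: return ''
  match pvSplit '[' seg with
  | [] => []                                        -- unreachable: split is never empty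
  | p0 :: rest =>
    match pvNormPlain p0 with
    | none => []
    | some plain => pvSegParts rest plain

-- port of the main `for seg in raw[2:].split('.')` loop followed by '.'.join(out_segs)
def pvJoinLoop (segs : List (List Char)) (acc : List (List Char)) : String :=
  match segs with
  | [] => String.ofList (List.intercalate ['.'] acc)
  | s :: rest =>
    let n := pvNormSeg s
    if n.isEmpty then "" else pvJoinLoop rest (acc ++ [n])

def normalize_glob_suffix_id_py_alt (pattern : String) : String :=
  let raw := (PySem.Str.strip pattern).toList
  if !PySem.Chars.startswith raw ['*', '.'] then "" else
  pvJoinLoop (pvSplit '.' (raw.drop 2)) []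

-- ===== PRECONDITION & SPEC =====
def Spec_normalize_glob_suffix_id_py (pattern : String) (out : String) : Prop := out = normalize_glob_suffix_id_py_alt pattern
instance (pattern : String) (out : String) : Decidable (Spec_normalize_glob_suffix_id_py pattern out) := by unfold Spec_normalize_glob_suffix_id_py; infer_instance

-- ===== CLAIM (what is proved, stated in full; the proofs are below) =====
def Claim_equal_normalize_glob_suffix_id_py : Prop := ∀ (pattern : String), Dom_normalize_glob_suffix_id_py pattern → Spec_normalize_glob_suffix_id_py pattern (normalize_glob_suffix_id_py pattern)

-- ===== LEMMAS AND PROOFS =====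

-- Option-valued mirror of A's bracket normalizer: none exactly where it errors out with ''
def pvNormO (text : List Char) : Option (List Char) :=
  match text with
  | [] => some []
  | ch :: rest =>
    if ch = '[' then
      let content := rest.takeWhile (fun c => c != ']')
      if content.length = rest.length then none
      else
        match content with
        | [a, b] =>
          if PySem.Chars.isalpha a && PySem.Chars.isalpha b then
            if PySem.Chars.lowerChar a = PySem.Chars.lowerChar b then
              (pvNormO (rest.drop (content.length + 1))).map (PySem.Chars.lowerChar a :: ·)
            else none
          else none
        | _ => none
    else if pvAllowedA ch then (pvNormO rest).map (PySem.Chars.lowerChar ch :: ·)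
    else none
  termination_by text.length
  decreasing_by all_goals simp

-- character-class facts about PySem.Chars.lowerChar used throughout
theorem pvChar_le_iff (a b : Char) : (a ≤ b) ↔ a.toNat ≤ b.toNat := Iff.rfl

theorem pvIsupper_iff (c : Char) : PySem.Chars.isupper c = true ↔ (65 ≤ c.toNat ∧ c.toNat ≤ 90) := by
  simp [PySem.Chars.isupper, pvChar_le_iff]

theorem pvIslower_iff (c : Char) : PySem.Chars.islower c = true ↔ (97 ≤ c.toNat ∧ c.toNat ≤ 122) := by
  simp [PySem.Chars.islower, pvChar_le_iff]

theorem pvLowerChar_toNat (c : Char) (h : PySem.Chars.isupper c = true) :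
    (PySem.Chars.lowerChar c).toNat = c.toNat + 32 := by
  have h1 := (pvIsupper_iff c).mp h
  have hv : (c.toNat + 32).isValidChar := Or.inl (by omega)
  simp only [PySem.Chars.lowerChar, h, if_pos]
  rw [Char.toNat_ofNat]
  simp [hv]

theorem pvLowerChar_of_not_upper (c : Char) (h : PySem.Chars.isupper c = false) :
    PySem.Chars.lowerChar c = c := by
  simp [PySem.Chars.lowerChar, h]

theorem pvLowerChar_islower (c : Char) (h : PySem.Chars.isalpha c = true) :
    PySem.Chars.islower (PySem.Chars.lowerChar c) = true := by
  rcases Bool.eq_false_or_eq_true (PySem.Chars.isupper c) with hu | hu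
  · rw [pvIslower_iff, pvLowerChar_toNat c hu]
    have h1 := (pvIsupper_iff c).mp hu
    omega
  · rw [pvLowerChar_of_not_upper c hu]
    simpa [PySem.Chars.isalpha, hu] using h

theorem pvLowerChar_idem (c : Char) :
    PySem.Chars.lowerChar (PySem.Chars.lowerChar c) = PySem.Chars.lowerChar c := by
  rcases Bool.eq_false_or_eq_true (PySem.Chars.isupper c) with hu | hu
  case _ =>
    apply pvLowerChar_of_not_upper
    have h1 := (pvIsupper_iff c).mp hu
    have ht := pvLowerChar_toNat c hu
    rw [Bool.eq_false_iff]
    intro hc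
    have := (pvIsupper_iff _).mp hc
    omega
  case _ => rw [pvLowerChar_of_not_upper c hu, pvLowerChar_of_not_upper c hu]

theorem pvLowerChar_ne_dot (c : Char) (h : PySem.Chars.isalpha c = true) :
    PySem.Chars.lowerChar c ≠ '.' := by
  intro he
  have := pvLowerChar_islower c h
  rw [he] at this
  simp [pvIslower_iff] at this

theorem pvIsdigit_iff (c : Char) : PySem.Chars.isdigit c = true ↔ (48 ≤ c.toNat ∧ c.toNat ≤ 57) := by
  simp [PySem.Chars.isdigit, pvChar_le_iff]

theorem pvLowerChar_of_digit (c : Char) (h : PySem.Chars.isdigit c = true) :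
    PySem.Chars.lowerChar c = c := by
  apply pvLowerChar_of_not_upper
  rw [Bool.eq_false_iff]
  intro hc
  have := (pvIsupper_iff c).mp hc
  have := (pvIsdigit_iff c).mp h
  omega

theorem pvLowerChar_isalnum (c : Char) (h : PySem.Chars.isalnum c = true) :
    PySem.Chars.isalnum (PySem.Chars.lowerChar c) = true ∧
      PySem.Chars.lowerChar (PySem.Chars.lowerChar c) = PySem.Chars.lowerChar c := by
  refine ⟨?_, pvLowerChar_idem c⟩
  simp only [PySem.Chars.isalnum] at h ⊢
  rcases Bool.or_eq_true_iff.mp h with ha | hd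
  · have := pvLowerChar_islower c ha
    simp [PySem.Chars.isalpha, this]
  · rw [pvLowerChar_of_digit c hd, hd]; simp

-- every char kept by A's char test is fixed by lower and still passes after lowering
theorem pvAllowedA_lower (c : Char) (h : pvAllowedA c = true) :
    pvAllowedA (PySem.Chars.lowerChar c) = true ∧
      PySem.Chars.lowerChar (PySem.Chars.lowerChar c) = PySem.Chars.lowerChar c := by
  simp only [pvAllowedA, Bool.or_eq_true_iff, beq_iff_eq] at h
  rcases h with hn | h
  · have := pvLowerChar_isalnum c hn
    simp [pvAllowedA, this.1, this.2]
  · have hne : PySem.Chars.isupper c = false := by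
      rcases h with ((h | h) | h) | h <;> subst h <;> decide
    rw [pvLowerChar_of_not_upper c hne]
    rw [pvLowerChar_of_not_upper c hne]
    simp [pvAllowedA, h]

-- lowering never creates a '.': lowerChar c = '.' only for c = '.'
theorem pvLowerChar_ne_dot' (c : Char) (h : c ≠ '.') : PySem.Chars.lowerChar c ≠ '.' := by
  rcases Bool.eq_false_or_eq_true (PySem.Chars.isupper c) with hu | hu
  · intro he
    have ht := pvLowerChar_toNat c hu
    have h1 := (pvIsupper_iff c).mp hu
    rw [he] at ht
    have hd : ('.' : Char).toNat = 46 := by decide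
    omega
  · rw [pvLowerChar_of_not_upper c hu]; exact h

theorem pvBracketLoop_eq (text acc : List Char) :
    pvBracketLoop text acc = match pvNormO text with
      | none => []
      | some r => acc ++ r := by
  fun_induction pvBracketLoop text acc
  case case1 => simp [pvNormO]
  case case2 =>
    rename_i res rest content hlen
    have hlen' : (List.takeWhile (fun c => c != ']') rest).length = rest.length := hlen
    rw [pvNormO]
    simp [hlen']
  case case3 =>
    rename_i res rest content hlen a b hc ha hl ih
    have hc' : List.takeWhile (fun c => c != ']') rest = [a, b] := hc
    have hlen' : ¬ (List.takeWhile (fun c => c != ']') rest).length = rest.length := hlen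
    rw [pvNormO]
    cases hx : pvNormO (List.drop (content.length + 1) rest) <;>
      simp_all
  case case4 =>
    rename_i res rest content hlen a b hc ha hl
    have hc' : List.takeWhile (fun c => c != ']') rest = [a, b] := hc
    have hlen' : ¬ (List.takeWhile (fun c => c != ']') rest).length = rest.length := hlen
    rw [pvNormO]; simp_all
  case case5 =>
    rename_i res rest content hlen a b hc ha
    have hc' : List.takeWhile (fun c => c != ']') rest = [a, b] := hc
    have hlen' : ¬ (List.takeWhile (fun c => c != ']') rest).length = rest.length := hlen
    rw [pvNormO]
    by_cases h1 : PySem.Chars.isalpha a = true <;> simp_all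
  case case6 =>
    rename_i res rest content hlen hnc
    have hlen' : ¬ (List.takeWhile (fun c => c != ']') rest).length = rest.length := hlen
    have hnc' : ∀ (a b : Char), List.takeWhile (fun c => c != ']') rest = [a, b] → False := hnc
    rw [pvNormO]
    simp only [if_neg hlen']
    rcases hcw : List.takeWhile (fun c => c != ']') rest with _ | ⟨a, _ | ⟨b, _ | _⟩⟩ <;>
      simp_all
  case case7 =>
    rename_i res ch rest hch ha ih
    rw [pvNormO]
    cases hx : pvNormO rest <;> simp_all
  case case8 =>
    rename_i res ch rest hch ha
    rw [pvNormO]; simp_all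

theorem pvNormO_chars (text : List Char) :
    ∀ r, pvNormO text = some r → ∀ c ∈ r, pvAllowedA c = true ∧ PySem.Chars.lowerChar c = c := by
  fun_induction pvNormO text
  case case1 => intro r h c hc; simp at h; subst h; simp at hc
  case case2 => simp
  case case3 =>
    rename_i rest content hlen a b hc hab hl ih
    intro r h c hcr
    rcases Option.map_eq_some_iff.mp h with ⟨r', hr', he⟩
    subst he
    rcases List.mem_cons.mp hcr with he | hm
    · subst he
      refine ⟨?_, pvLowerChar_idem a⟩
      have := pvLowerChar_islower a (Bool.and_eq_true_iff.mp hab).1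
      simp [pvAllowedA, PySem.Chars.isalnum, PySem.Chars.isalpha, this]
    · exact ih r' hr' c hm
  case case4 => simp
  case case5 => simp
  case case6 => simp
  case case7 =>
    rename_i ch rest hch hal ih
    intro r h c hcr
    rcases Option.map_eq_some_iff.mp h with ⟨r', hr', he⟩
    subst he
    rcases List.mem_cons.mp hcr with he | hm
    · subst he
      exact ⟨(pvAllowedA_lower ch hal).1, pvLowerChar_idem ch⟩
    · exact ih r' hr' c hm
  case case8 => simp

-- chars a successful normalizer run may have consumed
theorem pvNormO_text_chars (text : List Char) :
    ∀ r, pvNormO text = some r → ∀ c ∈ text, (pvAllowedA c || c == '[' || c == ']') = true := by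
  fun_induction pvNormO text
  case case1 => simp
  case case2 => simp
  case case3 =>
    rename_i rest content hlen a b hc hab hl ih
    intro r h c hcr
    rcases Option.map_eq_some_iff.mp h with ⟨r', hr', he⟩
    have hc' : List.takeWhile (fun c => c != ']') rest = [a, b] := hc
    have hsplit : rest = [a, b] ++ List.dropWhile (fun c => c != ']') rest := by
      conv_lhs => rw [← List.takeWhile_append_dropWhile (p := fun c => c != ']') (l := rest)]
      rw [hc']
    have hdrop : List.dropWhile (fun c => c != ']') rest = rest.drop 2 := by
      conv_rhs => rw [hsplit]
      simp
    rcases hdw : List.dropWhile (fun c => c != ']') rest with _ | ⟨x, xs⟩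
    case _ =>
      exfalso; apply hlen
      rw [hc, hsplit, hdw]; simp
    case _ =>
      have hx : x = ']' := by
        have hne : List.dropWhile (fun c => c != ']') rest ≠ [] := by rw [hdw]; simp
        have hh := List.head_dropWhile_not (fun c => c != ']') hne
        simp only [hdw] at hh
        simpa using hh
      subst hx
      have hxs : xs = rest.drop (content.length + 1) := by
        have h3 : rest.drop 2 = ']' :: xs := by rw [← hdrop, hdw]
        have hl2 : content.length = 2 := by rw [hc]; rfl
        rw [hl2]
        rw [show rest.drop 3 = (rest.drop 2).drop 1 by simp]
        rw [h3]
        simp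
      rcases List.mem_cons.mp hcr with he | hm
      · subst he; simp
      · have hmm : c ∈ [a, b] ++ (']' :: xs) := by
          rw [← hdw, ← hsplit]; exact hm
        rcases List.mem_append.mp hmm with hm2 | hm2
        · have hab' := Bool.and_eq_true_iff.mp hab
          rcases List.mem_cons.mp hm2 with he | hm3
          · subst he
            simp [pvAllowedA, PySem.Chars.isalnum, hab'.1]
          · rcases List.mem_cons.mp hm3 with he | hm4
            · subst he
              simp [pvAllowedA, PySem.Chars.isalnum, hab'.2]
            · simp at hm4
        · rcases List.mem_cons.mp hm2 with he | hm3
          · subst he; simp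
          · rw [hxs] at hm3
            exact ih r' hr' c hm3
  case case4 => simp
  case case5 => simp
  case case6 => simp
  case case7 =>
    rename_i ch rest hch hal ih
    intro r h c hcr
    rcases Option.map_eq_some_iff.mp h with ⟨r', hr', he⟩
    rcases List.mem_cons.mp hcr with he2 | hm
    · subst he2; simp [hal]
    · exact ih r' hr' c hm
  case case8 => simp

theorem pvSingleton_prefix (x : Char) (l : List Char) : [x] <+: l ↔ l.head? = some x := by
  cases l <;> simp [List.cons_prefix_cons, eq_comm]

theorem pvSingleton_suffix (x : Char) (l : List Char) : [x] <:+ l ↔ l.getLast? = some x := by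
  constructor
  · rintro ⟨t, rfl⟩; simp
  · intro h
    rcases List.getLast?_eq_some_iff.mp h with ⟨l', rfl⟩
    exact ⟨l', rfl⟩

theorem pvBad_none (t : List Char) (c : Char) (hc : c ∈ t)
    (hbad : (pvAllowedA c || c == '[' || c == ']') = false) : pvNormO t = none := by
  cases hx : pvNormO t with
  | none => rfl
  | some r => exact absurd (pvNormO_text_chars t r hx c hc) (by simp [hbad])


-- "good bracket head": the first three chars are a b ']' with a,b alpha of equal lower;
-- then the bracket emits lower a and scanning continues after the ']'
def pvBr (t : List Char) : Option (Char × List Char) :=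
  match t with
  | a :: b :: c :: u =>
    if c = ']' ∧ PySem.Chars.isalpha a = true ∧ PySem.Chars.isalpha b = true ∧
        PySem.Chars.lowerChar a = PySem.Chars.lowerChar b
    then some (PySem.Chars.lowerChar a, u) else none
  | _ => none

theorem pvBr_none_fst (a : Char) (w : List Char) (h : PySem.Chars.isalpha a = false) :
    pvBr (a :: w) = none := by
  rcases w with _ | ⟨b, _ | ⟨c, u⟩⟩ <;> simp [pvBr, h]

theorem pvBr_none_snd (a b : Char) (w : List Char) (h : PySem.Chars.isalpha b = false) :
    pvBr (a :: b :: w) = none := by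
  rcases w with _ | ⟨c, u⟩ <;> simp [pvBr, h]

theorem pvBr_none_third (a b c : Char) (w : List Char) (h : c ≠ ']') :
    pvBr (a :: b :: c :: w) = none := by
  simp [pvBr, h]

-- A's bracket step, in terms of pvBr
theorem pvNormO_bracket (t : List Char) :
    pvNormO ('[' :: t) = match pvBr t with
      | none => none
      | some (x, u) => (pvNormO u).map (x :: ·) := by
  rw [pvNormO]
  simp only [reduceIte]
  rcases t with _ | ⟨a, _ | ⟨b, _ | ⟨c, u⟩⟩⟩
  · simp [pvBr]
  · by_cases ha : a = ']'
    · subst ha; simp [pvBr, List.takeWhile_cons]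
    · simp [pvBr, List.takeWhile_cons, ha]
  · by_cases ha : a = ']'
    · subst ha; simp [pvBr, List.takeWhile_cons]
    · by_cases hb : b = ']'
      · subst hb; simp [pvBr, List.takeWhile_cons, ha]
      · simp [pvBr, List.takeWhile_cons, ha, hb]
  · by_cases ha : a = ']'
    · subst ha
      rw [pvBr_none_fst _ _ (by decide)]
      simp only [List.takeWhile_cons, bne_self_eq_false, Bool.false_eq_true, reduceIte]
      split <;> simp
    · by_cases hb : b = ']'
      · subst hb
        rw [pvBr_none_snd _ _ _ (by decide)]
        simp only [List.takeWhile_cons, bne_iff_ne, ne_eq, ha, not_false_eq_true,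
          reduceIte, bne_self_eq_false, Bool.false_eq_true]
        split <;> simp
      · by_cases hc : c = ']'
        · subst hc
          simp only [List.takeWhile_cons, bne_iff_ne, ne_eq, ha, hb,
            not_false_eq_true, reduceIte, bne_self_eq_false, Bool.false_eq_true]
          by_cases hA : PySem.Chars.isalpha a = true
          · by_cases hB : PySem.Chars.isalpha b = true
            · by_cases hL : PySem.Chars.lowerChar a = PySem.Chars.lowerChar b
              · simp [pvBr, hA, hB, hL]
              · simp [pvBr, hA, hB, hL]
            · simp [pvBr, hA, hB]
          · simp only [Bool.not_eq_true] at hA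
            simp [pvBr, hA]
        · -- first ']' is at index ≥ 3 (or absent): content is never a 2-list
          simp only [List.takeWhile_cons, bne_iff_ne, ne_eq, ha, hb, hc,
            not_false_eq_true, reduceIte]
          rw [pvBr_none_third a b c u hc]
          split <;> simp


-- a '.' right after the scanned prefix cannot complete a bracket head
theorem pvBr_append_dot (p t : List Char) :
    pvBr (p ++ '.' :: t) = (pvBr p).map (fun xu => (xu.1, xu.2 ++ '.' :: t)) := by
  rcases p with _ | ⟨a, _ | ⟨b, _ | ⟨c, u⟩⟩⟩
  · rw [show ([] ++ '.' :: t : List Char) = '.' :: t from rfl,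
      pvBr_none_fst _ _ (by decide)]
    simp [pvBr]
  · rw [show ([a] ++ '.' :: t : List Char) = a :: '.' :: t from rfl,
      pvBr_none_snd _ _ _ (by decide)]
    simp [pvBr]
  · rw [show ([a, b] ++ '.' :: t : List Char) = a :: b :: '.' :: t from rfl,
      pvBr_none_third _ _ _ _ (by decide)]
    simp [pvBr]
  · show pvBr (a :: b :: c :: (u ++ '.' :: t)) = _
    by_cases h : c = ']' ∧ PySem.Chars.isalpha a = true ∧ PySem.Chars.isalpha b = true ∧
        PySem.Chars.lowerChar a = PySem.Chars.lowerChar b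
    · simp [pvBr, h]
    · simp [pvBr, h]

-- off the '.', A's and B's per-character tests agree
theorem pvAllowedAB (c : Char) (h : c ≠ '.') : pvAllowedA c = pvAllowedB c := by
  have hf : (c == '.') = false := by simpa using h
  simp [pvAllowedA, pvAllowedB, hf]

theorem pvNormO_nil : pvNormO [] = some [] := by rw [pvNormO]

theorem pvNormPlain_nil : pvNormPlain [] = some [] := by
  simp [pvNormPlain, PySem.Chars.lower]

theorem pvNormPlain_cons (c : Char) (s : List Char) :
    pvNormPlain (c :: s) =
      if pvAllowedB c then (pvNormPlain s).map (PySem.Chars.lowerChar c :: ·) else none := by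
  by_cases h : pvAllowedB c = true
  · by_cases h2 : s.all pvAllowedB = true
    · simp [pvNormPlain, h, h2, PySem.Chars.lower]
    · simp only [Bool.not_eq_true] at h2
      simp [pvNormPlain, h, h2]
  · simp only [Bool.not_eq_true] at h
    simp [pvNormPlain, h]

-- A's scan across a bracket-free, dot-free prefix is _norm_plain followed by the rest
theorem pvNormO_plain_append (p t : List Char) (hb : ('[' : Char) ∉ p) (hd : ('.' : Char) ∉ p) :
    pvNormO (p ++ t) = match pvNormPlain p with
      | none => none
      | some lp => (pvNormO t).map (lp ++ ·) := by
  induction p with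
  | nil =>
    rw [pvNormPlain_nil]
    simp
  | cons c p' ih =>
    have hc1 : c ≠ '[' := fun he => hb (he ▸ List.mem_cons_self)
    have hc2 : c ≠ '.' := fun he => hd (he ▸ List.mem_cons_self)
    have hb' : ('[' : Char) ∉ p' := fun hm => hb (List.mem_cons_of_mem _ hm)
    have hd' : ('.' : Char) ∉ p' := fun hm => hd (List.mem_cons_of_mem _ hm)
    rw [List.cons_append, pvNormO, pvNormPlain_cons]
    simp only [if_neg hc1]
    rw [pvAllowedAB c hc2]
    by_cases hA : pvAllowedB c = true
    · rw [if_pos hA, if_pos hA, ih hb' hd']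
      rcases pvNormPlain p' with _ | lp
      · simp
      · rcases pvNormO t with _ | r <;> simp
    · simp only [Bool.not_eq_true] at hA
      simp [hA]

-- A's scan splits at an unbracketed '.' (a bracket can never span a '.')
theorem pvNormO_dot_append :
    ∀ (n : ℕ) (p t : List Char), p.length ≤ n → ('.' : Char) ∉ p →
      pvNormO (p ++ '.' :: t) = match pvNormO p, pvNormO t with
        | some a, some b => some (a ++ '.' :: b)
        | _, _ => none := by
  intro n
  induction n with
  | zero =>
    intro p t hn _
    have : p = [] := List.eq_nil_of_length_eq_zero (Nat.le_zero.mp hn)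
    subst this
    rw [pvNormO_nil, List.nil_append, pvNormO]
    simp only [reduceIte, show pvAllowedA '.' = true from by decide,
      show PySem.Chars.lowerChar '.' = '.' from by decide]
    rcases pvNormO t with _ | b <;> simp
  | succ n ih =>
    intro p t hn hd
    rcases p with _ | ⟨c, p'⟩
    · rw [pvNormO_nil, List.nil_append, pvNormO]
      simp only [reduceIte, show pvAllowedA '.' = true from by decide,
        show PySem.Chars.lowerChar '.' = '.' from by decide]
      rcases pvNormO t with _ | b <;> simp
    · have hc2 : c ≠ '.' := fun he => hd (he ▸ List.mem_cons_self)
      have hd' : ('.' : Char) ∉ p' := fun hm => hd (List.mem_cons_of_mem _ hm)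
      by_cases hc1 : c = '['
      · subst hc1
        rw [List.cons_append, pvNormO_bracket, pvNormO_bracket, pvBr_append_dot]
        rcases hbr : pvBr p' with _ | ⟨x, u⟩
        · simp
        · -- u is a sublist tail of p': p' = a :: b :: ']' :: u
          obtain ⟨a, b, hsh⟩ : ∃ a b, p' = a :: b :: ']' :: u := by
            rcases p' with _ | ⟨a, _ | ⟨b, _ | ⟨e, w⟩⟩⟩ <;> simp [pvBr] at hbr
            rcases hbr with ⟨⟨he, _, _, _⟩, _, hw⟩
            exact ⟨a, b, by rw [he, hw]⟩
          have hu_len : u.length ≤ n := by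
            subst hsh; simp at hn; omega
          have hu_d : ('.' : Char) ∉ u := by
            subst hsh
            intro hm; exact hd' (by simp [hm])
          simp only [Option.map_some]
          rw [ih u t hu_len hu_d]
          rcases pvNormO u with _ | ua
          · simp
          · rcases pvNormO t with _ | b2 <;> simp
      · rw [List.cons_append, pvNormO, pvNormO]
        simp only [if_neg hc1]
        by_cases hA : pvAllowedA c = true
        · rw [if_pos hA, if_pos hA]
          rw [ih p' t (by simpa using Nat.le_of_succ_le_succ (by simpa using hn)) hd']
          rcases pvNormO p' with _ | a
          · simp
          · rcases pvNormO t with _ | b <;> simp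
        · simp only [Bool.not_eq_true] at hA
          simp [hA]


-- structure of pvSplit: first chunk, then recursion after the separator
theorem pvSplit_decomp (sep : Char) (l : List Char) :
    pvSplit sep l = l.takeWhile (fun c => c ≠ sep) ::
      (match l.dropWhile (fun c => c ≠ sep) with
        | [] => []
        | _ :: r => pvSplit sep r) := by
  induction l with
  | nil => simp [pvSplit]
  | cons c rest ih =>
    by_cases h : c = sep
    · subst h
      simp [pvSplit, List.takeWhile_cons, List.dropWhile_cons]
    · rw [pvSplit]
      simp only [if_neg h, ih]
      simp [List.takeWhile_cons, List.dropWhile_cons, h]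

theorem pvSplit_sep_not_mem (sep : Char) :
    ∀ (l : List Char), ∀ x ∈ pvSplit sep l, sep ∉ x := by
  intro l
  induction l with
  | nil => intro x hx; simp [pvSplit] at hx; simp [hx]
  | cons c rest ih =>
    intro x hx
    by_cases h : c = sep
    · subst h
      rw [pvSplit, if_pos rfl] at hx
      rcases List.mem_cons.mp hx with hx2 | hx2
      · subst hx2; simp
      · exact ih x hx2
    · rw [pvSplit, if_neg h] at hx
      generalize hs : pvSplit sep rest = ps at hx
      rcases ps with _ | ⟨y, ys⟩
      · simp at hx
      · simp only [List.modifyHead_cons, List.mem_cons] at hx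
        rcases hx with hx | hx
        · subst hx
          intro hm
          rcases List.mem_cons.mp hm with rfl | hm2
          · exact h rfl
          · exact ih y (by rw [hs]; exact List.mem_cons_self) hm2
        · exact ih x (by rw [hs]; exact List.mem_cons_of_mem _ hx)

-- reduction equations for pvSegParts on one part
theorem pvSegParts_good (a b : Char) (tl : List Char) (parts : List (List Char))
    (acc : List Char) (ha : PySem.Chars.isalpha a = true) (hb : PySem.Chars.isalpha b = true)
    (hl : PySem.Chars.lowerChar a = PySem.Chars.lowerChar b) :
    pvSegParts ((a :: b :: ']' :: tl) :: parts) acc =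
      match pvNormPlain tl with
      | none => []
      | some r => pvSegParts parts (acc ++ PySem.Chars.lowerChar a :: r) := by
  simp [pvSegParts, ha, hb, hl]

theorem pvSegParts_badthird (a b c : Char) (tl : List Char) (parts : List (List Char))
    (acc : List Char) (h : c ≠ ']') :
    pvSegParts ((a :: b :: c :: tl) :: parts) acc = [] := by
  simp [pvSegParts, h]

theorem pvSegParts_badalpha (a b : Char) (tl : List Char) (parts : List (List Char))
    (acc : List Char)
    (h : ¬ (PySem.Chars.isalpha a = true ∧ PySem.Chars.isalpha b = true ∧
        PySem.Chars.lowerChar a = PySem.Chars.lowerChar b)) :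
    pvSegParts ((a :: b :: ']' :: tl) :: parts) acc = [] := by
  by_cases hA : PySem.Chars.isalpha a = true
  · by_cases hB : PySem.Chars.isalpha b = true
    · have hne : PySem.Chars.lowerChar a ≠ PySem.Chars.lowerChar b := fun he => h ⟨hA, hB, he⟩
      simp [pvSegParts, hA, hB, hne]
    · simp only [Bool.not_eq_true] at hB
      simp [pvSegParts, hB]
  · simp only [Bool.not_eq_true] at hA
    simp [pvSegParts, hA]

theorem pvSegParts_short (w : List Char) (parts : List (List Char)) (acc : List Char)
    (h : w.length < 3) : pvSegParts (w :: parts) acc = [] := by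
  rcases w with _ | ⟨a, _ | ⟨b, _ | ⟨c, tl⟩⟩⟩
  · simp [pvSegParts]
  · simp [pvSegParts]
  · simp [pvSegParts]
  · simp at h; omega

-- the bracket-parts loop of B computes A's bracket scan of '[' :: t
theorem pvSegParts_eq :
    ∀ (n : ℕ) (t acc : List Char), t.length ≤ n → ('.' : Char) ∉ t →
      pvSegParts (pvSplit '[' t) acc = match pvNormO ('[' :: t) with
        | none => []
        | some r => acc ++ r := by
  intro n
  induction n with
  | zero =>
    intro t acc hn _
    have : t = [] := List.eq_nil_of_length_eq_zero (Nat.le_zero.mp hn)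
    subst this
    rw [pvNormO_bracket]
    simp [pvSplit, pvSegParts, pvBr]
  | succ n ih =>
    intro t acc hn hd
    obtain ⟨part, htws⟩ : ∃ w, t.takeWhile (fun c => c ≠ '[') = w := ⟨_, rfl⟩
    obtain ⟨dwt, hdws⟩ : ∃ w, t.dropWhile (fun c => c ≠ '[') = w := ⟨_, rfl⟩
    have hsplit : t = part ++ dwt := by
      rw [← htws, ← hdws, List.takeWhile_append_dropWhile]
    have htw : ('[' : Char) ∉ part := by
      intro hm
      have := List.mem_takeWhile_imp (htws ▸ hm)
      simp at this
    have hhd : ∀ d r, dwt = d :: r → d = '[' := by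
      intro d r hdw
      have h0 := List.head_dropWhile_not (fun c => c ≠ '[') (l := t)
      rw [hdws, hdw] at h0
      simpa using h0 (by simp)
    rw [pvSplit_decomp, htws, hdws, pvNormO_bracket]
    have hpartmem : ∀ x ∈ part, x ∈ t := by
      intro x hx
      exact (htws ▸ List.takeWhile_sublist _).mem hx
    rcases part with _ | ⟨p, _ | ⟨q, _ | ⟨c3, tl⟩⟩⟩
    -- part = [] or [p] or [p,q] : B rejects; A's bracket head is bad
    · rcases dwt with _ | ⟨d, t'⟩
      · have ht : t = [] := by rw [hsplit]; rfl
        subst ht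
        simp [pvSegParts, pvBr]
      · have hdd := hhd d t' rfl
        subst hdd
        have ht : t = '[' :: t' := by rw [hsplit]; rfl
        rw [ht, pvBr_none_fst _ _ (by decide), pvSegParts_short _ _ _ (by simp)]
    · rcases dwt with _ | ⟨d, t'⟩
      · have ht : t = [p] := by rw [hsplit]; rfl
        subst ht
        rw [pvSegParts_short _ _ _ (by simp)]
        rfl
      · have hdd := hhd d t' rfl
        subst hdd
        have ht : t = p :: '[' :: t' := by rw [hsplit]; rfl
        rw [ht, pvBr_none_snd _ _ _ (by decide), pvSegParts_short _ _ _ (by simp)]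
    · rcases dwt with _ | ⟨d, t'⟩
      · have ht : t = [p, q] := by rw [hsplit]; rfl
        subst ht
        rw [pvSegParts_short _ _ _ (by simp)]
        rfl
      · have hdd := hhd d t' rfl
        subst hdd
        have ht : t = p :: q :: '[' :: t' := by rw [hsplit]; rfl
        rw [ht, pvBr_none_third _ _ _ _ (by decide), pvSegParts_short _ _ _ (by simp)]
    · -- part = p :: q :: c3 :: tl : shapes align with pvBr on the first three chars
      have httl : ('.' : Char) ∉ tl :=
        fun hm => hd (hpartmem _ (by simp [hm]))
      have htltl : ('[' : Char) ∉ tl := fun hm => htw (by simp [hm])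
      have ht : t = p :: q :: c3 :: (tl ++ dwt) := by rw [hsplit]; rfl
      by_cases hc3 : c3 = ']'
      · subst hc3
        by_cases hgood : PySem.Chars.isalpha p = true ∧ PySem.Chars.isalpha q = true ∧
            PySem.Chars.lowerChar p = PySem.Chars.lowerChar q
        · -- good bracket
          have hbr : pvBr t = some (PySem.Chars.lowerChar p, tl ++ dwt) := by
            rw [ht]
            simp [pvBr, hgood.1, hgood.2.1, hgood.2.2]
          rw [hbr, pvSegParts_good _ _ _ _ _ hgood.1 hgood.2.1 hgood.2.2]
          dsimp only
          rw [pvNormO_plain_append tl _ htltl httl]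
          rcases hpl : pvNormPlain tl with _ | r
          · rcases dwt with _ | ⟨d, t'⟩ <;> simp
          · dsimp only
            rcases dwt with _ | ⟨d, t'⟩
            · rw [pvNormO_nil]
              dsimp only [pvSegParts]
              simp
            · have hdd := hhd d t' rfl
              subst hdd
              rw [pvNormO_bracket]
              have ht'len : t'.length ≤ n := by
                have h1 : t.length = tl.length + t'.length + 4 := by
                  rw [ht]; simp; omega
                omega
              have ht'd : ('.' : Char) ∉ t' := by
                intro hm
                apply hd
                rw [ht]
                simp [hm]
              have hih := ih t' (acc ++ PySem.Chars.lowerChar p :: r) ht'len ht'd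
              rw [pvNormO_bracket] at hih
              rw [hih]
              cases hbr2 : pvBr t' with
              | none => simp
              | some xu =>
                obtain ⟨x2, u2⟩ := xu
                rcases hx : pvNormO u2 with _ | r2 <;> simp [hx]
        · -- bracket checks fail in both
          have hbr : pvBr t = none := by
            rw [ht]
            simp only [pvBr]
            rw [if_neg]
            intro hcon
            exact hgood ⟨hcon.2.1, hcon.2.2.1, hcon.2.2.2⟩
          rw [hbr, pvSegParts_badalpha _ _ _ _ _ hgood]
      · -- third char of the chunk is not ']': B rejects, A's bracket head is bad
        have hbr : pvBr t = none := by
          rw [ht]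
          exact pvBr_none_third _ _ _ _ hc3
        rw [hbr, pvSegParts_badthird _ _ _ _ _ _ hc3]

-- a successful A-scan of a nonempty text yields a nonempty result
theorem pvNormO_ne_nil (s : List Char) (r : List Char) (h : pvNormO s = some r) :
    (r = [] ↔ s = []) := by
  rcases s with _ | ⟨c, rest⟩
  · rw [pvNormO_nil] at h
    simp at h
    simp [h]
  · constructor
    · intro hr
      subst hr
      exfalso
      by_cases hc : c = '['
      · subst hc
        rw [pvNormO_bracket] at h
        cases hb : pvBr rest with
        | none => rw [hb] at h; simp at h
        | some xu =>
          obtain ⟨x, u⟩ := xu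
          rw [hb] at h
          simp only [Option.map_eq_some_iff] at h
          rcases h with ⟨r', _, he⟩
          simp at he
      · rw [pvNormO] at h
        simp only [if_neg hc] at h
        by_cases hA : pvAllowedA c = true
        · rw [if_pos hA] at h
          rcases Option.map_eq_some_iff.mp h with ⟨r', _, he⟩
          simp at he
        · simp only [Bool.not_eq_true] at hA
          simp [hA] at h
    · intro hs
      simp at hs

-- B's segment normalizer computes A's scan on a nonempty dot-free segment
theorem pvNormSeg_eq (s : List Char) (hne : s ≠ []) (hd : ('.' : Char) ∉ s) :
    pvNormSeg s = match pvNormO s with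
      | none => []
      | some r => r := by
  rw [pvNormSeg, if_neg (by simpa [List.isEmpty_iff] using hne)]
  obtain ⟨part, htws⟩ : ∃ w, s.takeWhile (fun c => c ≠ '[') = w := ⟨_, rfl⟩
  obtain ⟨dwt, hdws⟩ : ∃ w, s.dropWhile (fun c => c ≠ '[') = w := ⟨_, rfl⟩
  have hsplit : s = part ++ dwt := by rw [← htws, ← hdws, List.takeWhile_append_dropWhile]
  have htw : ('[' : Char) ∉ part := by
    intro hm
    have := List.mem_takeWhile_imp (htws ▸ hm)
    simp at this
  have htd : ('.' : Char) ∉ part := fun hm => hd (hsplit ▸ List.mem_append_left _ hm)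
  rw [pvSplit_decomp, htws, hdws]
  rcases dwt with _ | ⟨d, t'⟩
  · have hs : s = part ++ [] := by rw [hsplit]
    conv_rhs => rw [hs]
    rw [pvNormO_plain_append _ [] htw htd, pvNormO_nil]
    dsimp only
    cases hpp : pvNormPlain part with
    | none => rfl
    | some plain =>
      dsimp only [pvSegParts]
      simp
  · have hdd : d = '[' := by
      have h0 := List.head_dropWhile_not (fun c => c ≠ '[') (l := s)
      rw [hdws] at h0
      simpa using h0 (by simp)
    subst hdd
    conv_rhs => rw [hsplit]
    rw [pvNormO_plain_append _ _ htw htd]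
    have ht'd : ('.' : Char) ∉ t' :=
      fun hm => hd (hsplit ▸ List.mem_append_right _ (by simp [hm]))
    dsimp only
    cases hpp : pvNormPlain part with
    | none => rfl
    | some plain =>
      dsimp only
      rw [pvSegParts_eq t'.length t' plain le_rfl ht'd]
      cases pvNormO ('[' :: t') with
      | none => rfl
      | some r => simp


theorem pvIntercalate_singleton (x : List Char) : List.intercalate ['.'] [x] = x := by
  simp [List.intercalate]

theorem pvIntercalate_cons (x y : List Char) (l : List (List Char)) :
    List.intercalate ['.'] (x :: y :: l) = x ++ '.' :: List.intercalate ['.'] (y :: l) := by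
  simp [List.intercalate, List.intersperse]

-- A's scan over the whole tail, as a fold over its dot-separated segments
def segJoinO : List (List Char) → Option (List Char)
  | [] => some []
  | [s] => pvNormO s
  | s :: s2 :: rest =>
    (pvNormO s).bind fun a => (segJoinO (s2 :: rest)).map fun b => a ++ '.' :: b

theorem pvNormO_split :
    ∀ (n : ℕ) (u : List Char), u.length ≤ n → pvNormO u = segJoinO (pvSplit '.' u) := by
  intro n
  induction n with
  | zero =>
    intro u hn
    have : u = [] := List.eq_nil_of_length_eq_zero (Nat.le_zero.mp hn)
    subst this
    rw [pvNormO_nil]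
    simp [pvSplit, segJoinO, pvNormO_nil]
  | succ n ih =>
    intro u hn
    obtain ⟨part, htws⟩ : ∃ w, u.takeWhile (fun c => c ≠ '.') = w := ⟨_, rfl⟩
    obtain ⟨dwt, hdws⟩ : ∃ w, u.dropWhile (fun c => c ≠ '.') = w := ⟨_, rfl⟩
    have hsplit : u = part ++ dwt := by rw [← htws, ← hdws, List.takeWhile_append_dropWhile]
    have htd : ('.' : Char) ∉ part := by
      intro hm
      have := List.mem_takeWhile_imp (htws ▸ hm)
      simp at this
    rw [pvSplit_decomp, htws, hdws]
    rcases dwt with _ | ⟨d, u'⟩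
    · have hu : u = part := by rw [hsplit]; simp
      subst hu
      rfl
    · have hdd : d = '.' := by
        have h0 := List.head_dropWhile_not (fun c => c ≠ '.') (l := u)
        rw [hdws] at h0
        simpa using h0 (by simp)
      subst hdd
      have hu : u = part ++ '.' :: u' := by rw [hsplit]
      have hlen : u'.length ≤ n := by
        have : u.length = part.length + u'.length + 1 := by
          rw [hu]; simp only [List.length_append, List.length_cons]; omega
        omega
      rw [hu, pvNormO_dot_append (part.length) part u' le_rfl htd]
      dsimp only
      obtain ⟨p2, h2⟩ : ∃ w, u'.takeWhile (fun c => c ≠ '.') = w := ⟨_, rfl⟩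
      rw [pvSplit_decomp (sep := '.') (l := u'), h2]
      have hres := ih u' hlen
      rw [pvSplit_decomp, h2] at hres
      rw [segJoinO, ← hres]
      cases pvNormO part with
      | none => rfl
      | some a =>
        cases pvNormO u' with
        | none => rfl
        | some b => rfl

theorem segJoinO_spec :
    ∀ (segs : List (List Char)), segs ≠ [] →
      segJoinO segs = if segs.all (fun s => (pvNormO s).isSome)
        then some (List.intercalate ['.'] (segs.map (fun s => (pvNormO s).getD [])))
        else none := by
  intro segs
  induction segs with
  | nil => intro h; exact absurd rfl h
  | cons s rest ih =>
    intro _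
    rcases rest with _ | ⟨s2, rest'⟩
    · rw [segJoinO]
      cases hx : pvNormO s with
      | none => simp [hx]
      | some a => simp [hx, pvIntercalate_singleton]
    · rw [segJoinO, ih (by simp)]
      cases hx : pvNormO s with
      | none => simp [hx]
      | some a =>
        by_cases hall : ((s2 :: rest').all fun s => (pvNormO s).isSome) = true
        · simp only [hx, hall, if_pos, Option.bind_some, Option.map_some]
          have : (s :: s2 :: rest').all (fun s => (pvNormO s).isSome) = true := by
            simp [hx, List.all_cons] at hall ⊢
            exact hall
          rw [if_pos this]
          simp only [List.map_cons, hx, Option.getD_some]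
          rw [pvIntercalate_cons]
        · simp only [Bool.not_eq_true] at hall
          have h2 : (s :: s2 :: rest').all (fun s => (pvNormO s).isSome) = false := by
            simp only [List.all_cons, Bool.and_eq_false_iff] at hall ⊢
            right; exact hall
          rw [hall, h2]
          simp

-- B's main loop in terms of A's scan of each segment
theorem pvJoinLoop_eq :
    ∀ (segs : List (List Char)) (acc : List (List Char)),
      (∀ s ∈ segs, ('.' : Char) ∉ s) →
      pvJoinLoop segs acc =
        if segs.all (fun s => !s.isEmpty && (pvNormO s).isSome)
        then String.ofList (List.intercalate ['.'] (acc ++ segs.map (fun s => (pvNormO s).getD [])))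
        else "" := by
  intro segs
  induction segs with
  | nil => intro acc _; simp [pvJoinLoop]
  | cons s rest ih =>
    intro acc hdot
    rw [pvJoinLoop]
    by_cases hse : s = []
    · subst hse
      have h0 : pvNormSeg [] = [] := by simp [pvNormSeg]
      simp [h0]
    · rw [pvNormSeg_eq s hse (hdot s List.mem_cons_self)]
      cases hx : pvNormO s with
      | none =>
        simp [hx]
      | some r =>
        have hrne : r ≠ [] := fun hr => hse ((pvNormO_ne_nil s r hx).mp hr)
        simp only
        rw [if_neg (by simpa [List.isEmpty_iff] using hrne)]
        rw [ih (acc ++ [r]) (fun x hx2 => hdot x (List.mem_cons_of_mem _ hx2))]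
        by_cases hall : (rest.all fun s => !s.isEmpty && (pvNormO s).isSome) = true
        · rw [if_pos hall]
          have h2 : ((s :: rest).all fun s => !s.isEmpty && (pvNormO s).isSome) = true := by
            simp only [List.all_cons, hall, Bool.and_true]
            simp [hx, List.isEmpty_iff, hse]
          rw [if_pos h2]
          simp [hx, List.append_assoc]
        · simp only [Bool.not_eq_true] at hall
          have h2 : ((s :: rest).all fun s => !s.isEmpty && (pvNormO s).isSome) = false := by
            simp only [List.all_cons, Bool.and_eq_false_iff]
            right; exact hall
          rw [hall, h2]
          simp


-- a dot-free input scans to a dot-free output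
theorem pvNormO_dotfree (text : List Char) (hd : ('.' : Char) ∉ text) :
    ∀ r, pvNormO text = some r → ('.' : Char) ∉ r := by
  fun_induction pvNormO text
  case case1 => intro r h; simp at h; subst h; simp
  case case2 => simp
  case case3 =>
    rename_i rest content hlen a b hc hab hl ih
    intro r h hm
    rcases Option.map_eq_some_iff.mp h with ⟨r', hr', he⟩
    subst he
    rcases List.mem_cons.mp hm with he | hm2
    · exact pvLowerChar_ne_dot a (Bool.and_eq_true_iff.mp hab).1 he.symm
    · have hd' : ('.' : Char) ∉ rest.drop (content.length + 1) := by
        intro hx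
        exact hd (List.mem_cons_of_mem _ (List.mem_of_mem_drop hx))
      exact ih hd' r' hr' hm2
  case case4 => simp
  case case5 => simp
  case case6 => simp
  case case7 =>
    rename_i ch rest hch hal ih
    intro r h hm
    rcases Option.map_eq_some_iff.mp h with ⟨r', hr', he⟩
    subst he
    rcases List.mem_cons.mp hm with he | hm2
    · have hch2 : ch ≠ '.' := fun hq => hd (by simp [hq])
      exact pvLowerChar_ne_dot' ch hch2 he.symm
    · have hd' : ('.' : Char) ∉ rest := fun hx => hd (List.mem_cons_of_mem _ hx)
      exact ih hd' r' hr' hm2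
  case case8 => simp

-- '..' inside a cons
theorem pvDD_infix_cons (c : Char) (l : List Char) :
    ['.', '.'] <:+: (c :: l) ↔ (c = '.' ∧ l.head? = some '.') ∨ ['.', '.'] <:+: l := by
  rw [List.infix_cons_iff]
  constructor
  · rintro (hp | hi)
    · rcases l with _ | ⟨d, l'⟩
      · simp [List.cons_prefix_cons] at hp
      · rw [List.cons_prefix_cons] at hp
        rcases hp with ⟨he, hp2⟩
        rw [List.cons_prefix_cons] at hp2
        exact Or.inl ⟨he.symm, by simp [← hp2.1]⟩
    · exact Or.inr hi
  · rintro (⟨he, hh⟩ | hi)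
    · subst he
      rcases l with _ | ⟨d, l'⟩
      · simp at hh
      · simp only [List.head?_cons, Option.some_inj] at hh
        subst hh
        exact Or.inl (by simp [List.cons_prefix_cons])
    · exact Or.inr hi

theorem pvDD_infix_append (x y : List Char) (hx : ('.' : Char) ∉ x) :
    (['.', '.'] <:+: (x ++ y)) ↔ ['.', '.'] <:+: y := by
  induction x with
  | nil => simp
  | cons c x' ih =>
    have hc : c ≠ '.' := fun he => hx (by simp [he])
    have hx' : ('.' : Char) ∉ x' := fun hm => hx (List.mem_cons_of_mem _ hm)
    rw [List.cons_append, pvDD_infix_cons]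
    simp [hc, ih hx']

-- the four post-conditions of A hold iff every dot-separated piece is nonempty
theorem pvIntercalate_cond :
    ∀ (rs : List (List Char)), rs ≠ [] → (∀ x ∈ rs, ('.' : Char) ∉ x) →
      ((List.intercalate ['.'] rs ≠ [] ∧
        (List.intercalate ['.'] rs).head? ≠ some '.' ∧
        (List.intercalate ['.'] rs).getLast? ≠ some '.' ∧
        ¬ ['.', '.'] <:+: List.intercalate ['.'] rs) ↔ ∀ x ∈ rs, x ≠ []) := by
  intro rs
  induction rs with
  | nil => intro h; exact absurd rfl h
  | cons x rest ih =>
    intro _ hdot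
    rcases rest with _ | ⟨y, rest'⟩
    · rw [pvIntercalate_singleton]
      have hxd : ('.' : Char) ∉ x := hdot x List.mem_cons_self
      constructor
      · rintro ⟨hne, _, _, _⟩ z hz
        rcases List.mem_singleton.mp hz with rfl
        exact hne
      · intro hall
        have hxne : x ≠ [] := hall x List.mem_cons_self
        refine ⟨hxne, ?_, ?_, ?_⟩
        · intro hh
          exact hxd (List.mem_of_mem_head? (hh ▸ rfl))
        · intro hl
          exact hxd (List.mem_of_getLast? hl)
        · intro hi
          exact hxd (hi.subset (by simp))
    · rw [pvIntercalate_cons]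
      have hxd : ('.' : Char) ∉ x := hdot x List.mem_cons_self
      have hrest : ∀ z ∈ y :: rest', ('.' : Char) ∉ z :=
        fun z hz => hdot z (List.mem_cons_of_mem _ hz)
      obtain ⟨ic, hic⟩ : ∃ w, List.intercalate ['.'] (y :: rest') = w := ⟨_, rfl⟩
      rw [hic]
      by_cases hxe : x = []
      · subst hxe
        simp only [List.nil_append]
        constructor
        · rintro ⟨_, hh, _, _⟩
          exact absurd (by simp : ('.' :: ic).head? = some '.') hh
        · intro hall
          exact absurd rfl (hall [] List.mem_cons_self)
      · have hh : (x ++ '.' :: ic).head? = x.head? := by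
          rcases x with _ | ⟨c, x'⟩
          · exact absurd rfl hxe
          · simp
        have hgl : (x ++ '.' :: ic).getLast? = ('.' :: ic).getLast? :=
          List.getLast?_append_of_ne_nil _ (by simp)
        have hdd := pvDD_infix_append x ('.' :: ic) hxd
        have hhx : x.head? ≠ some '.' := by
          intro hq
          exact hxd (List.mem_of_mem_head? (hq ▸ rfl))
        constructor
        · rintro ⟨_, _, hl, hi⟩
          rw [hgl] at hl
          rw [hdd, pvDD_infix_cons] at hi
          simp only [eq_self_iff_true, true_and, not_or] at hi
          have hicne : ic ≠ [] := by
            intro he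
            subst he
            simp at hl
          have hih : ic.head? ≠ some '.' := hi.1
          have hil : ic.getLast? ≠ some '.' := by
            rcases ic with _ | ⟨d, ic'⟩
            · exact absurd rfl hicne
            · simpa using hl
          intro z hz
          rcases List.mem_cons.mp hz with rfl | hz2
          · exact hxe
          · exact (((ih (by simp) hrest).mp ⟨hic ▸ hicne, hic ▸ hih, hic ▸ hil, hic ▸ hi.2⟩) z hz2)
        · intro hall
          have hic4 := (ih (by simp) hrest).mpr (fun z hz => hall z (List.mem_cons_of_mem _ hz))
          rw [hic] at hic4
          obtain ⟨hicne, hich, hicl, hici⟩ := hic4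
          refine ⟨by simp, by rw [hh]; exact hhx, ?_, ?_⟩
          · rw [hgl]
            rcases ic with _ | ⟨d, ic'⟩
            · exact absurd rfl hicne
            · simpa using hicl
          · rw [hdd, pvDD_infix_cons]
            simp only [eq_self_iff_true, true_and, not_or]
            exact ⟨hich, hici⟩

-- B's whole pipeline after the '*.' guard, in terms of A's scan of the tail
theorem pvAlt_eq (u : List Char) :
    pvJoinLoop (pvSplit '.' u) [] =
      match pvNormO u with
      | none => ""
      | some r =>
        if r ≠ [] ∧ r.head? ≠ some '.' ∧ r.getLast? ≠ some '.' ∧ ¬ ['.', '.'] <:+: r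
        then String.ofList r else "" := by
  obtain ⟨segs, hsegs⟩ : ∃ w, pvSplit '.' u = w := ⟨_, rfl⟩
  have hne : segs ≠ [] := by
    rw [← hsegs, pvSplit_decomp]
    simp
  have hdot : ∀ s ∈ segs, ('.' : Char) ∉ s := fun s hs => pvSplit_sep_not_mem '.' u s (hsegs ▸ hs)
  have hJ : pvNormO u = segJoinO segs := by
    rw [pvNormO_split u.length u le_rfl, hsegs]
  rw [hsegs, pvJoinLoop_eq segs [] hdot, hJ, segJoinO_spec segs hne]
  by_cases hall : (segs.all fun s => (pvNormO s).isSome) = true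
  · rw [if_pos hall]
    obtain ⟨rs, hrs⟩ : ∃ w, segs.map (fun s => (pvNormO s).getD []) = w := ⟨_, rfl⟩
    rw [hrs]
    dsimp only
    have hsome : ∀ s ∈ segs, pvNormO s = some ((pvNormO s).getD []) := by
      intro s hs
      have := List.all_eq_true.mp hall s hs
      rcases hx : pvNormO s with _ | v
      · rw [hx] at this; simp at this
      · simp [hx]
    have hrs_dot : ∀ x ∈ rs, ('.' : Char) ∉ x := by
      intro x hx
      rw [← hrs] at hx
      rcases List.mem_map.mp hx with ⟨s, hs, rfl⟩
      exact pvNormO_dotfree s (hdot s hs) _ (hsome s hs)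
    have hrs_ne : rs ≠ [] := by
      rw [← hrs]
      simpa using hne
    have hcond := pvIntercalate_cond rs hrs_ne hrs_dot
    -- the loop's emptiness test matches the piece-nonemptiness condition
    have hloop : (segs.all fun s => !s.isEmpty && (pvNormO s).isSome) = true ↔ ∀ x ∈ rs, x ≠ [] := by
      constructor
      · intro h x hx
        rw [← hrs] at hx
        rcases List.mem_map.mp hx with ⟨s, hs, rfl⟩
        have := List.all_eq_true.mp h s hs
        simp only [Bool.and_eq_true_iff, Bool.not_eq_eq_eq_not, Bool.not_true,
          List.isEmpty_eq_false_iff] at this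
        intro he
        exact this.1 ((pvNormO_ne_nil s _ (hsome s hs)).mp he)
      · intro h
        apply List.all_eq_true.mpr
        intro s hs
        have hxne : (pvNormO s).getD [] ≠ [] := h _ (by rw [← hrs]; exact List.mem_map_of_mem hs)
        have hsne : s ≠ [] := by
          intro he
          apply hxne
          exact (pvNormO_ne_nil s _ (hsome s hs)).mpr he
        simp only [Bool.and_eq_true_iff, Bool.not_eq_eq_eq_not, Bool.not_true,
          List.isEmpty_eq_false_iff]
        exact ⟨hsne, List.all_eq_true.mp hall s hs⟩
    by_cases hc : ∀ x ∈ rs, x ≠ []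
    · rw [if_pos (hloop.mpr hc), if_pos (hcond.mpr hc)]
      simp
    · rw [if_neg (fun h => hc (hloop.mp h)), if_neg (fun h => hc (hcond.mp h))]
  · simp only [Bool.not_eq_true] at hall
    have h2 : (segs.all fun s => !s.isEmpty && (pvNormO s).isSome) = false := by
      rcases List.all_eq_false.mp hall with ⟨s, hs, hf⟩
      refine List.all_eq_false.mpr ⟨s, hs, ?_⟩
      simp only [Bool.and_eq_true_iff, not_and]
      intro _
      exact hf
    rw [hall, h2]
    simp

-- ===== VERDICT (by name: the statement is the Claim_ definition above) =====
theorem normalize_glob_suffix_id_py_spec : Claim_equal_normalize_glob_suffix_id_py := by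
  intro pattern _
  unfold Spec_normalize_glob_suffix_id_py normalize_glob_suffix_id_py normalize_glob_suffix_id_py_alt
  dsimp only
  cases hsw : PySem.Chars.startswith (PySem.Str.strip pattern).toList ['*', '.'] with
  | false => simp [hsw]
  | true =>
    obtain ⟨u, hu⟩ : ∃ u, (PySem.Str.strip pattern).toList = '*' :: '.' :: u := by
      rcases (PySem.Chars.startswith_iff _ _).mp hsw with ⟨t2, ht⟩
      exact ⟨t2, ht.symm⟩
    simp only [hsw, Bool.not_true, Bool.false_eq_true, if_false]
    rw [hu]
    simp only [List.drop_succ_cons, List.drop_zero]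
    rw [pvAlt_eq]
    by_cases h1 : (PySem.Chars.isIn ['/'] ('*' :: '.' :: u)
        || PySem.Chars.isIn ['\\'] ('*' :: '.' :: u)) = true
    · have hnone : pvNormO u = none := by
        rcases Bool.or_eq_true_iff.mp h1 with hi | hi <;>
        · have hm := (List.singleton_infix_iff _ _).mp ((PySem.Chars.isIn_iff_infix _ _).mp hi)
          simp only [List.mem_cons] at hm
          rcases hm with h | h | h
          · exact absurd h (by decide)
          · exact absurd h (by decide)
          · exact pvBad_none u _ h (by decide)
      rw [hnone]
      simp [h1]
    · rw [if_neg (by simpa using h1)]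
      by_cases h2 : PySem.Chars.isIn ['*'] u = true
      · have hnone : pvNormO u = none := by
          have hm := (List.singleton_infix_iff _ _).mp ((PySem.Chars.isIn_iff_infix _ _).mp h2)
          exact pvBad_none u _ hm (by decide)
        rw [hnone]
        simp [h2]
      · rw [if_neg (by simpa using h2)]
        by_cases h3 : (PySem.Chars.isIn ['?'] ('*' :: '.' :: u)
            || PySem.Chars.isIn ['{'] ('*' :: '.' :: u)
            || PySem.Chars.isIn ['}'] ('*' :: '.' :: u)) = true
        · have hnone : pvNormO u = none := by
            rcases Bool.or_eq_true_iff.mp h3 with hi | hi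
            · rcases Bool.or_eq_true_iff.mp hi with hj | hj <;>
              · have hm := (List.singleton_infix_iff _ _).mp ((PySem.Chars.isIn_iff_infix _ _).mp hj)
                simp only [List.mem_cons] at hm
                rcases hm with h | h | h
                · exact absurd h (by decide)
                · exact absurd h (by decide)
                · exact pvBad_none u _ h (by decide)
            · have hm := (List.singleton_infix_iff _ _).mp ((PySem.Chars.isIn_iff_infix _ _).mp hi)
              simp only [List.mem_cons] at hm
              rcases hm with h | h | h
              · exact absurd h (by decide)
              · exact absurd h (by decide)
              · exact pvBad_none u _ h (by decide)
          rw [hnone]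
          simp [h3]
        · rw [if_neg (by simpa using h3)]
          rw [pvBracketLoop_eq]
          cases hx : pvNormO u with
          | none => simp
          | some r =>
            simp only [List.nil_append]
            have hchars := pvNormO_chars u r hx
            have hall : r.all pvAllowedA = true :=
              List.all_eq_true.mpr (fun c hc => (hchars c hc).1)
            have hlowr : PySem.Chars.lower r = r := by
              show r.map PySem.Chars.lowerChar = r
              rw [List.map_congr_left (fun c hc => (hchars c hc).2)]
              exact List.map_id r
            by_cases hre : r = []
            · subst hre; simp
            · rw [if_neg (by simpa [List.isEmpty_iff] using hre)]
              by_cases hend : r.getLast? = some '.'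
              · have he : PySem.Chars.endswith r ['.'] = true :=
                  (PySem.Chars.endswith_iff _ _).mpr ((pvSingleton_suffix _ _).mpr hend)
                simp [he, hend]
              · by_cases hhead : r.head? = some '.'
                · have hs : PySem.Chars.startswith r ['.'] = true :=
                    (PySem.Chars.startswith_iff _ _).mpr ((pvSingleton_prefix _ _).mpr hhead)
                  simp [hs, hhead]
                · have hew : PySem.Chars.endswith r ['.'] = false := by
                    rw [Bool.eq_false_iff]
                    intro he
                    exact hend ((pvSingleton_suffix _ _).mp ((PySem.Chars.endswith_iff _ _).mp he))
                  have hsw2 : PySem.Chars.startswith r ['.'] = false := by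
                    rw [Bool.eq_false_iff]
                    intro hp
                    exact hhead ((pvSingleton_prefix _ _).mp ((PySem.Chars.startswith_iff _ _).mp hp))
                  by_cases hdd : ['.', '.'] <:+: r
                  · have hi : PySem.Chars.isIn ['.', '.'] r = true :=
                      (PySem.Chars.isIn_iff_infix _ _).mpr hdd
                    simp [hi, hdd, hew, hsw2]
                  · have hi : PySem.Chars.isIn ['.', '.'] r = false := by
                      rw [Bool.eq_false_iff]
                      intro hin
                      exact hdd ((PySem.Chars.isIn_iff_infix _ _).mp hin)
                    simp [hi, hdd, hew, hsw2, hall, hlowr, hre, hend, hhead]
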